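-- pv_equiv track=rewrite | github.com/openstack-infra/subunit2sql | subunit2sql/shell.py | get_run_totals
-- ===== SOURCE A (Python) =====
-- def get_run_totals(results):
--     success = len(
--         [x for x in results if results[x]['status'] in ['success', 'xfail']])
--     fails = len(
--         [x for x in results if results[x]['status'] in ['fail', 'uxsuccess']])
--     skips = len([x for x in results if results[x]['status'] == 'skip'])
--     totals = {
--         'success': success,
--         'fails': fails,
--         'skips': skips,
--     }
--     return totals
-- ===== SOURCE B (Python) =====
-- def get_run_totals(results):
--     success = 0
--     fails = 0
--     skips = 0
--     for x in results:
--         status = results[x]['status']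
--         if status in ('success', 'xfail'):
--             success += 1
--         elif status in ('fail', 'uxsuccess'):
--             fails += 1
--         elif status == 'skip':
--             skips += 1
--     return {'success': success, 'fails': fails, 'skips': skips}
-- ===== Notes on version B (the rewrite author's own statement) =====
-- stated objective: simpler
-- what changed: Replaces three independent filtering passes over the results with a single pass that classifies each entry's status into one of three running counters.
import Mathlib
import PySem

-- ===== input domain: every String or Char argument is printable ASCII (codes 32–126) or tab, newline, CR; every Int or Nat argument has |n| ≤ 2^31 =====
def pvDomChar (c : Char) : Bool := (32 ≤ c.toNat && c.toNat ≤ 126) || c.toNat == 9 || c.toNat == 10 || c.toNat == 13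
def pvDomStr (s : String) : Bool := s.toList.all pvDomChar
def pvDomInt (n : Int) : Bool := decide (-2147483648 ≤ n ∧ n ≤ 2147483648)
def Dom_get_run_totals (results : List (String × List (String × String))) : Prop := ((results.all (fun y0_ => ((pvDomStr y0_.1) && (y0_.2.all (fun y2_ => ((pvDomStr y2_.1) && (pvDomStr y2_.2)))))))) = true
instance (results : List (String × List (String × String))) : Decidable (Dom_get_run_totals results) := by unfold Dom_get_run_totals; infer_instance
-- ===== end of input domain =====

-- B replaces A's three filtering passes with one pass keeping three counters; same return value.

-- shared helper: results[x]['status'] (first-match dict lookup; none = Python KeyError, excluded by Pre_)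
def pvStatus (results : List (String × List (String × String))) (x : String) : Option String :=
  (List.lookup x results).bind (fun d => List.lookup "status" d)

-- ===== PORT A =====
-- three list comprehensions over the keys, then len of each; dict literal at the end
def get_run_totals (results : List (String × List (String × String))) : List (String × Int) :=
  let success : Int :=
    (((results.map Prod.fst).filter (fun x =>
      let st := (pvStatus results x).getD ""
      st == "success" || st == "xfail")).length : Int)
  let fails : Int :=
    (((results.map Prod.fst).filter (fun x =>
      let st := (pvStatus results x).getD ""
      st == "fail" || st == "uxsuccess")).length : Int)
  let skips : Int :=
    (((results.map Prod.fst).filter (fun x =>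
      (pvStatus results x).getD "" == "skip")).length : Int)
  [("success", success), ("fails", fails), ("skips", skips)]

-- ===== PORT B =====
-- one fold over the entries, branching on the status into three accumulators
def get_run_totals_alt (results : List (String × List (String × String))) : List (String × Int) :=
  let t : Int × Int × Int := results.foldl (fun acc p =>
    let st := (pvStatus results p.1).getD ""
    if st == "success" || st == "xfail" then (acc.1 + 1, acc.2.1, acc.2.2)
    else if st == "fail" || st == "uxsuccess" then (acc.1, acc.2.1 + 1, acc.2.2)
    else if st == "skip" then (acc.1, acc.2.1, acc.2.2 + 1)
    else acc) (0, 0, 0)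
  [("success", t.1), ("fails", t.2.1), ("skips", t.2.2)]

-- ===== PRECONDITION & SPEC =====
-- Pre_ excludes exactly the inputs where some entry's dict lacks a "status" key: there Python A raises KeyError.
def Pre_get_run_totals (results : List (String × List (String × String))) : Prop :=
  ∀ p ∈ results, (pvStatus results p.1).isSome = true
instance (results : List (String × List (String × String))) : Decidable (Pre_get_run_totals results) := by unfold Pre_get_run_totals; infer_instance

def pvWitness_get_run_totals : (List (String × List (String × String))) :=
  [("t1", [("status", "success")]), ("t2", [("status", "fail")])]

def Spec_get_run_totals (results : List (String × List (String × String))) (out : List (String × Int)) : Prop := out = get_run_totals_alt results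
instance (results : List (String × List (String × String))) (out : List (String × Int)) : Decidable (Spec_get_run_totals results out) := by unfold Spec_get_run_totals; infer_instance

-- ===== CLAIM (what is proved, stated in full; the proofs are below) =====
def Claim_equal_get_run_totals : Prop := ∀ (results : List (String × List (String × String))), Dom_get_run_totals results → Pre_get_run_totals results → Spec_get_run_totals results (get_run_totals results)

-- ===== LEMMAS AND PROOFS =====

-- one step of B's fold adds 1 to exactly the counter whose filter condition hd satisfies
theorem pv_step (results : List (String × List (String × String)))
    (hd : String × List (String × String)) (acc : Int × Int × Int) :
    (let st := (pvStatus results hd.1).getD ""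
     if st == "success" || st == "xfail" then (acc.1 + 1, acc.2.1, acc.2.2)
     else if st == "fail" || st == "uxsuccess" then (acc.1, acc.2.1 + 1, acc.2.2)
     else if st == "skip" then (acc.1, acc.2.1, acc.2.2 + 1)
     else acc) =
    (acc.1 + (if ((pvStatus results hd.1).getD "" == "success"
                 || (pvStatus results hd.1).getD "" == "xfail") then (1 : Int) else 0),
     acc.2.1 + (if ((pvStatus results hd.1).getD "" == "fail"
                 || (pvStatus results hd.1).getD "" == "uxsuccess") then (1 : Int) else 0),
     acc.2.2 + (if ((pvStatus results hd.1).getD "" == "skip") then (1 : Int) else 0)) := by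
  by_cases h1 : (pvStatus results hd.1).getD "" = "success"
  · simp [h1]
  by_cases h2 : (pvStatus results hd.1).getD "" = "xfail"
  · simp [h2]
  by_cases h3 : (pvStatus results hd.1).getD "" = "fail"
  · simp [h3]
  by_cases h4 : (pvStatus results hd.1).getD "" = "uxsuccess"
  · simp [h4]
  by_cases h5 : (pvStatus results hd.1).getD "" = "skip"
  · simp [h5]
  · simp [h1, h2, h3, h4, h5]

-- B's fold adds, to each starting counter, the corresponding filter-count of A.
theorem pv_fold_counts (results : List (String × List (String × String)))
    (l : List (String × List (String × String))) (s f k : Int) :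
    l.foldl (fun acc p =>
      let st := (pvStatus results p.1).getD ""
      if st == "success" || st == "xfail" then (acc.1 + 1, acc.2.1, acc.2.2)
      else if st == "fail" || st == "uxsuccess" then (acc.1, acc.2.1 + 1, acc.2.2)
      else if st == "skip" then (acc.1, acc.2.1, acc.2.2 + 1)
      else acc) ((s, f, k) : Int × Int × Int) =
    (s + ((l.filter (fun p =>
            let st := (pvStatus results p.1).getD ""
            st == "success" || st == "xfail")).length : Int),
     f + ((l.filter (fun p =>
            let st := (pvStatus results p.1).getD ""
            st == "fail" || st == "uxsuccess")).length : Int),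
     k + ((l.filter (fun p =>
            (pvStatus results p.1).getD "" == "skip")).length : Int)) := by
  induction l generalizing s f k with
  | nil => simp
  | cons hd tl ih =>
    rw [List.foldl_cons, pv_step, ih,
        List.filter_cons, List.filter_cons, List.filter_cons]
    split_ifs <;> simp <;> omega

-- ===== VERDICT (by name: the statement is the Claim_ definition above) =====
theorem get_run_totals_spec : Claim_equal_get_run_totals := by
  intro results _ _
  show get_run_totals results = get_run_totals_alt results
  simp only [get_run_totals, get_run_totals_alt]
  rw [pv_fold_counts]
  simp only [List.filter_map, List.length_map, zero_add]
  rfl
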